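-- pv_equiv track=rewrite | github.com/Jumpker/Curriculum | Algorithm/design lesson/exp2/save_programs.py | save_programs
-- ===== SOURCE A (Python) =====
-- def save_programs(ls, L):
--     """
--     type ls: list[int]
--     type L: int
--     rtype: List[int]
--
--     程序存储问题，设有n 个程序{1,2,…,n }要存放在长度为L的磁带上。程序i存放在磁带上的长度是li (1≤i≤n)
--     输入ls列表，表示程序i的所需的磁带长度
--     返回程序在磁带上的存储方案（原ls索引构成的列表res）
--
--     既然要存储尽可能多的程序，且磁带长度为L不变，那我们只要先把短的程序存起来就好了
--     """
--
--     if(len(ls) == 1):    #只有一个程序，返回1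
--         return [1]
--
--     res = []                # 结果列表，存储合并顺序（只包含原始序列的索引）
--     current_length = 0      # 已放入磁带的程序长度
--     min_length = float('inf')  # 当前剩余程序中长度最短的程序长度，初始设为无穷大
--     min_index = 0           # 当前剩余程序中长度最短的程序的索引
--     count = 0               # 已放入磁带的程序数量
--
--     while current_length < L:
--
--         # 找到当前剩余程序中长度最短的程序
--         for i in range(len(ls)):
--             if (ls[i] > 0 and ls[i] < min_length):
--                 min_length = ls[i]
--                 min_index = i
--
--         # 如果当前已放入磁带的程序长度加上最短程序的长度超过了磁带长度L  或   已全部放入磁带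
--         if (current_length + min_length > L or count == len(ls)):
--             break
--         # 将其放入磁带
--         res.append(min_index + 1)
--         current_length += min_length
--         # 标记已放入磁带的程序（长度为-1）
--         ls[min_index] = -1
--         min_length = float('inf')
--         count += 1
--     return res
-- ===== SOURCE B (Python) =====
-- def save_programs(ls, L):
--     # Sort-then-prefix-scan greedy (O(n log n)); reads ls without mutating it
--     # (A marks picked entries with -1 in place; return value equivalence only).
--     pairs = sorted(((l, i) for i, l in enumerate(ls) if l > 0), key=lambda p: p[0])
--     res = []
--     total = 0
--     for length, i in pairs:
--         if total + length > L:
--             break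
--         res.append(i + 1)
--         total += length
--     return res
-- ===== Notes on version B (the rewrite author's own statement) =====
-- stated objective: faster
-- what changed: A repeatedly rescans the whole list for the shortest remaining program and marks picks with -1 in place (O(n^2)); B does one stable sort of the positive lengths with their indices and a single prefix-sum scan that stops when the tape is full (O(n log n), no mutation of ls).
-- intended difference: On one-element lists whose single program does not fit (ls[0] > L) or has non-positive length, A returns [1] unconditionally while B returns [], the intended greedy answer since the program cannot be stored on the tape. — e.g. on save_programs([5], 3): A returns [1], B returns []
import Mathlib
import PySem

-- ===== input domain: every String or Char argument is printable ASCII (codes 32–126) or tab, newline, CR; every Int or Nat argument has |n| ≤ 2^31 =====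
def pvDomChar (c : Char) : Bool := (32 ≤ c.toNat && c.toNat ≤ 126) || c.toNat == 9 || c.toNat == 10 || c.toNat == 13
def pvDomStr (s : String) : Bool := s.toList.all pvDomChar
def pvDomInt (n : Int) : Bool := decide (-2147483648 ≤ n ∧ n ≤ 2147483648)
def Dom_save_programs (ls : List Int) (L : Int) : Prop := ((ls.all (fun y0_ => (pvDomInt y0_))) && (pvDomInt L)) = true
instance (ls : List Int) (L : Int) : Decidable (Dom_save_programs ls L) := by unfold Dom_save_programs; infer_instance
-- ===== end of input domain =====

-- B replaces A's repeated O(n) min-scans with one stable sort + prefix-sum scan; equivalence is about the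
-- RETURN value only (A marks picked entries of ls with -1 in place, B does not mutate ls).

-- ===== PORT A =====
-- inner `for i in range(len(ls))` scan; min_length = float('inf') is modelled as `none`
-- (exact: the Python inf is only ever COMPARED — every int is < inf — never stored in ls or res).
def pvScanStep (ls : List Int) (s : Option Int × Int) (i : Int) : Option Int × Int :=
  match s with
  | (none, mi) => if 0 < PySem.List.pyGetD ls i 0 then (some (PySem.List.pyGetD ls i 0), i) else (none, mi)
  | (some m, mi) =>
      if 0 < PySem.List.pyGetD ls i 0 ∧ PySem.List.pyGetD ls i 0 < m
      then (some (PySem.List.pyGetD ls i 0), i) else (some m, mi)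

def pvFindMin (ls : List Int) (mi : Int) : Option Int × Int :=
  (PySem.List.pyRange 0 (ls.length : Int) 1).foldl (pvScanStep ls) (none, mi)

-- scan invariant (also used below for the full characterisation of A's inner loop)
theorem pvScan_inv (ls : List Int) (mi : Int) : ∀ (k : Nat), k ≤ ls.length →
    ((PySem.List.pyRange 0 (k : Int) 1).foldl (pvScanStep ls) (none, mi) = (none, mi) ∧
       ∀ j : Nat, j < k → ¬ 0 < ls.getD j 0) ∨
    (∃ m i, (PySem.List.pyRange 0 (k : Int) 1).foldl (pvScanStep ls) (none, mi) = (some m, i) ∧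
       0 ≤ i ∧ i.toNat < k ∧ ls.getD i.toNat 0 = m ∧ 0 < m ∧
       (∀ j : Nat, j < k → 0 < ls.getD j 0 → m ≤ ls.getD j 0) ∧
       (∀ j : Nat, (j : Int) < i → 0 < ls.getD j 0 → m < ls.getD j 0)) := by
  intro k
  induction k with
  | zero =>
    intro _
    left
    exact ⟨by simp, by omega⟩
  | succ k ih =>
    intro hk
    have hk' : k ≤ ls.length := by omega
    have hsplit : (PySem.List.pyRange 0 ((k+1 : Nat) : Int) 1) = (PySem.List.pyRange 0 (k : Nat) 1) ++ [(k : Int)] := by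
      push_cast
      exact PySem.List.pyRange_one_succ_right (by omega)
    rw [hsplit, List.foldl_append]
    have hget : PySem.List.pyGetD ls ((k : Nat) : Int) 0 = ls.getD k 0 :=
      PySem.List.pyGetD_natCast ls k 0
    rcases ih hk' with ⟨hs, hneg⟩ | ⟨m, i, hs, hi0, hik, hval, hpos, hmin, hfirst⟩
    · rw [hs]
      simp only [List.foldl_cons, List.foldl_nil, pvScanStep]
      rw [hget]
      by_cases hp : 0 < ls.getD k 0
      · rw [if_pos hp]
        right
        refine ⟨ls.getD k 0, k, rfl, by omega, by simp, by simp, hp, ?_, ?_⟩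
        · intro j hj hjp
          have : j = k := by
            rcases Nat.lt_succ_iff_lt_or_eq.mp hj with h | h
            · exact absurd hjp (hneg j h)
            · exact h
          simp [this]
        · intro j hj hjp
          have : j < k := by exact_mod_cast hj
          exact absurd hjp (hneg j this)
      · rw [if_neg hp]
        left
        refine ⟨rfl, ?_⟩
        intro j hj
        rcases Nat.lt_succ_iff_lt_or_eq.mp hj with h | h
        · exact hneg j h
        · subst h; exact hp
    · rw [hs]
      simp only [List.foldl_cons, List.foldl_nil, pvScanStep]
      rw [hget]
      by_cases hp : 0 < ls.getD k 0 ∧ ls.getD k 0 < m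
      · rw [if_pos hp]
        right
        refine ⟨ls.getD k 0, k, rfl, by omega, by simp, by simp, hp.1, ?_, ?_⟩
        · intro j hj hjp
          rcases Nat.lt_succ_iff_lt_or_eq.mp hj with h | h
          · exact le_of_lt (lt_of_lt_of_le hp.2 (hmin j h hjp))
          · simp [h]
        · intro j hj hjp
          have hjk : j < k := by exact_mod_cast hj
          exact lt_of_lt_of_le hp.2 (hmin j hjk hjp)
      · rw [if_neg hp]
        right
        refine ⟨m, i, rfl, hi0, by omega, hval, hpos, ?_, hfirst⟩
        intro j hj hjp
        rcases Nat.lt_succ_iff_lt_or_eq.mp hj with h | h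
        · exact hmin j h hjp
        · subst h
          rcases not_and_or.mp hp with h | h
          · exact absurd hjp h
          · omega

theorem pvFindMin_pos (ls : List Int) (mi m i : Int) (h : pvFindMin ls mi = (some m, i)) :
    0 ≤ i ∧ i.toNat < ls.length ∧ 0 < ls.getD i.toNat 0 := by
  rcases pvScan_inv ls mi ls.length le_rfl with ⟨hs, _⟩ | ⟨m', i', hs, hi0, hik, hval, hpos, _, _⟩
  · rw [pvFindMin] at h; rw [hs] at h; exact absurd h (by simp)
  · rw [pvFindMin] at h; rw [hs] at h
    have hm : m' = m := by injection h with h1 h2; exact Option.some.inj h1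
    have hi : i' = i := by injection h with h1 h2
    subst hm hi
    exact ⟨hi0, hik, hval ▸ hpos⟩

theorem pvSet_pos_filter_lt (ls : List Int) (i : Int) (h0 : 0 ≤ i) (h1 : i.toNat < ls.length)
    (h2 : 0 < ls.getD i.toNat 0) :
    ((PySem.List.pySetD ls i (-1)).filter (fun x => decide (0 < x))).length <
      (ls.filter (fun x => decide (0 < x))).length := by
  rw [PySem.List.pySetD_of_nonneg ls (-1) h0]
  rw [← List.countP_eq_length_filter, ← List.countP_eq_length_filter, List.countP_set h1]
  have hg : (0 < ls[i.toNat]) := by rw [List.getD_eq_getElem ls 0 h1] at h2; exact h2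
  have hcpos : 0 < List.countP (fun x => decide (0 < x)) ls := by
    rw [List.countP_pos_iff]
    exact ⟨ls[i.toNat], ls.getElem_mem h1, by simpa using hg⟩
  simp only [hg, decide_true, if_true, decide_eq_true_eq]
  rw [if_neg (by norm_num)]
  omega

def pvALoop (ls : List Int) (L cur count mi : Int) (res : List Int) : List Int :=
  if cur < L then
    match h : pvFindMin ls mi with
    | (none, _) => res   -- min_length stayed inf: current + inf > L, break
    | (some m, i) =>
      if cur + m > L ∨ count = (ls.length : Int) then res
      else pvALoop (PySem.List.pySetD ls i (-1)) L (cur + m) (count + 1) i (res ++ [i + 1])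
  else res
termination_by (ls.filter (fun x => decide (0 < x))).length
decreasing_by
  have hp := pvFindMin_pos ls mi m i h
  exact pvSet_pos_filter_lt ls i hp.1 hp.2.1 hp.2.2

def save_programs (ls : List Int) (L : Int) : List Int :=
  if ls.length = 1 then [1]
  else pvALoop ls L 0 0 0 []

-- ===== PORT B =====
def pvPosPairs (ls : List Int) : List (Int × Int) :=
  ((PySem.List.enumerate ls 0).filter (fun p => decide (0 < p.2))).map (fun p => (p.2, p.1))

def pvBScan (L : Int) : List (Int × Int) → Int → List Int → List Int
  | [], _, res => res
  | (m, i) :: rest, total, res =>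
      if total + m > L then res else pvBScan L rest (total + m) (res ++ [i + 1])

def save_programs_alt (ls : List Int) (L : Int) : List Int :=
  pvBScan L (PySem.List.sorted (pvPosPairs ls) (fun p => p.1) false) 0 []

-- ===== PRECONDITION & SPEC =====
-- On a one-element list A returns [1] unconditionally, even when that single program does not fit on the
-- tape (ls[0] > L) or has no positive length; B returns [] there, which is the intended greedy answer.
def D_save_programs (ls : List Int) (L : Int) : Prop :=
  ls.length = 1 ∧ ¬ (0 < ls.getD 0 0 ∧ ls.getD 0 0 ≤ L)
instance (ls : List Int) (L : Int) : Decidable (D_save_programs ls L) := by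
  unfold D_save_programs; infer_instance
def Spec_save_programs (ls : List Int) (L : Int) (out : List Int) : Prop :=
  ¬ D_save_programs ls L → out = save_programs_alt ls L
instance (ls : List Int) (L : Int) (out : List Int) : Decidable (Spec_save_programs ls L out) := by
  unfold Spec_save_programs; infer_instance
def pvDiffWitness_save_programs : List Int × Int := ([5], 3)
def pvDiffWitnessOut_save_programs : (List Int) × (List Int) := ([1], [])

-- ===== CLAIM (what is proved, stated in full; the proofs are below) =====
def Claim_unchanged_save_programs : Prop := ∀ (ls : List Int) (L : Int), Dom_save_programs ls L → Spec_save_programs ls L (save_programs ls L)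
def Claim_changed_save_programs : Prop := Dom_save_programs (pvDiffWitness_save_programs.1) (pvDiffWitness_save_programs.2) ∧ D_save_programs (pvDiffWitness_save_programs.1) (pvDiffWitness_save_programs.2) ∧ save_programs (pvDiffWitness_save_programs.1) (pvDiffWitness_save_programs.2) = pvDiffWitnessOut_save_programs.1 ∧ save_programs_alt (pvDiffWitness_save_programs.1) (pvDiffWitness_save_programs.2) = pvDiffWitnessOut_save_programs.2 ∧ pvDiffWitnessOut_save_programs.1 ≠ pvDiffWitnessOut_save_programs.2
def Claim_exact_save_programs : Prop := ∀ (ls : List Int) (L : Int), Dom_save_programs ls L → D_save_programs ls L → save_programs ls L ≠ save_programs_alt ls L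

-- ===== LEMMAS AND PROOFS =====

-- strict lexicographic order on (length, original index) pairs
def pvLex (p q : Int × Int) : Prop := p.1 < q.1 ∨ (p.1 = q.1 ∧ p.2 < q.2)

theorem pvPosPairs_snd_lt (ls : List Int) :
    (pvPosPairs ls).Pairwise (fun p q => p.2 < q.2) := by
  unfold pvPosPairs
  refine List.Pairwise.map _ (fun a b h => h) ((PySem.List.pairwise_lt_enumerate ls 0).filter _)

theorem pvMem_posPairs (ls : List Int) (v j : Int) :
    (v, j) ∈ pvPosPairs ls ↔ 0 ≤ j ∧ j.toNat < ls.length ∧ ls.getD j.toNat 0 = v ∧ 0 < v := by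
  unfold pvPosPairs
  simp only [List.mem_map, List.mem_filter, PySem.List.mem_enumerate_iff]
  constructor
  · rintro ⟨p, ⟨⟨k, hk, rfl⟩, hp⟩, he⟩
    simp only [Prod.mk.injEq] at he
    obtain ⟨hv, hj⟩ := he
    simp only [zero_add] at hj hv
    subst hj hv
    refine ⟨by positivity, by simpa using hk, ?_, by simpa using hp⟩
    rw [List.getD_eq_getElem ls 0 (by simpa using hk)]
    simp
  · rintro ⟨h0, hk, hval, hpos⟩
    refine ⟨((j.toNat : Int), ls[j.toNat]), ⟨⟨j.toNat, hk, by simp [Int.toNat_of_nonneg h0]⟩, ?_⟩, ?_⟩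
    · simpa using (List.getD_eq_getElem ls 0 hk) ▸ hval ▸ hpos
    · rw [List.getD_eq_getElem ls 0 hk] at hval
      simp [hval, Int.toNat_of_nonneg h0]

theorem pvInsertBy_lex (x : Int × Int) (ys : List (Int × Int))
    (hys : ys.Pairwise pvLex) (hlt : ∀ a ∈ ys, a.2 < x.2) :
    (PySem.List.insertBy (fun a b => decide (a.1 < b.1)) x ys).Pairwise pvLex := by
  induction ys with
  | nil => simp [PySem.List.insertBy]
  | cons y ys ih =>
    rw [PySem.List.insertBy]
    by_cases hb : x.1 < y.1
    · simp only [hb, decide_true, if_true]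
      refine List.Pairwise.cons ?_ hys
      intro z hz
      rcases List.mem_cons.mp hz with rfl | hz
      · exact Or.inl hb
      · rcases List.rel_of_pairwise_cons hys hz with h | ⟨h1, _⟩
        · exact Or.inl (lt_trans hb h)
        · exact Or.inl (h1 ▸ hb)
    · simp only [hb, decide_false]
      refine List.Pairwise.cons ?_ (ih (List.Pairwise.of_cons hys) (fun a ha => hlt a (List.mem_cons_of_mem y ha)))
      intro z hz
      rcases (PySem.List.mem_insertBy _ _ _ _).mp hz with rfl | hz
      · rcases lt_or_eq_of_le (le_of_not_gt hb) with h | h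
        · exact Or.inl h
        · exact Or.inr ⟨h, hlt y (List.mem_cons_self)⟩
      · exact List.rel_of_pairwise_cons hys hz

theorem pvFoldl_insertBy_lex (xs : List (Int × Int)) (acc : List (Int × Int))
    (hacc : acc.Pairwise pvLex) (hsep : ∀ a ∈ acc, ∀ x ∈ xs, a.2 < x.2)
    (hxs : xs.Pairwise (fun p q => p.2 < q.2)) :
    (xs.foldl (fun acc x => PySem.List.insertBy (fun a b => decide (a.1 < b.1)) x acc) acc).Pairwise pvLex := by
  induction xs generalizing acc with
  | nil => exact hacc
  | cons x xs ih =>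
    simp only [List.foldl_cons]
    apply ih
    · exact pvInsertBy_lex x acc hacc (fun a ha => hsep a ha x List.mem_cons_self)
    · intro a ha y hy
      rcases (PySem.List.mem_insertBy _ _ _ _).mp ha with rfl | ha
      · exact List.rel_of_pairwise_cons hxs hy
      · exact hsep a ha y (List.mem_cons_of_mem x hy)
    · exact List.Pairwise.of_cons hxs

theorem pvSorted_lex (ls : List Int) :
    (PySem.List.sorted (pvPosPairs ls) (fun p => p.1) false).Pairwise pvLex := by
  rw [PySem.List.sorted_eq_foldl_insertBy]
  exact pvFoldl_insertBy_lex (pvPosPairs ls) [] (by simp) (by simp) (pvPosPairs_snd_lt ls)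

theorem pvEnum_set (ls : List Int) : ∀ (s : Int) (k : Nat) (v : Int),
    PySem.List.enumerate (ls.set k v) s
      = (PySem.List.enumerate ls s).map (fun p => if p.1 = s + (k : Int) then (p.1, v) else p) := by
  induction ls with
  | nil => intro s k v; simp [PySem.List.enumerate]
  | cons x xs ih =>
    intro s k v
    cases k with
    | zero =>
      simp only [List.set_cons_zero, PySem.List.enumerate_cons, List.map_cons]
      rw [if_pos (by simp)]
      congr 1
      have : ∀ p ∈ PySem.List.enumerate xs (s+1), (if p.1 = s + ((0:Nat) : Int) then (p.1, v) else p) = p := by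
        intro p hp
        rcases (PySem.List.mem_enumerate_iff xs (s+1) p).mp hp with ⟨j, hj, rfl⟩
        rw [if_neg (by simp; omega)]
      exact (List.map_congr_left this ▸ (List.map_id _)).symm
    | succ k =>
      simp only [List.set_cons_succ, PySem.List.enumerate_cons, List.map_cons]
      rw [if_neg (by omega)]
      congr 1
      rw [ih (s+1) k v]
      apply List.map_congr_left
      intro p _
      have harg : s + 1 + (k : Int) = s + ((k+1 : Nat) : Int) := by push_cast; ring
      rw [harg]

theorem pvPosPairs_set (ls : List Int) (i : Int) (h0 : 0 ≤ i) :
    pvPosPairs (PySem.List.pySetD ls i (-1)) = (pvPosPairs ls).filter (fun p => decide (p.2 ≠ i)) := by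
  rw [PySem.List.pySetD_of_nonneg ls (-1) h0]
  unfold pvPosPairs
  rw [pvEnum_set ls 0 i.toNat (-1)]
  simp only [zero_add, Int.toNat_of_nonneg h0]
  rw [List.filter_map, List.map_map, List.filter_map, List.filter_filter]
  have hfc : ∀ p ∈ PySem.List.enumerate ls 0,
      ((fun p => decide (0 < p.2)) ∘ fun p => if p.1 = i then (p.1, (-1:Int)) else p) p
        = (((fun p => decide (p.2 ≠ i)) ∘ fun p => ((p.2, p.1) : Int × Int)) p && decide (0 < p.2)) := by
    intro p _
    simp only [Function.comp]
    by_cases hpi : p.1 = i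
    · simp [hpi]
    · simp [hpi]
  rw [List.filter_congr hfc]
  apply List.map_congr_left
  intro p hp
  have h2 := (List.mem_filter.mp hp).2
  simp only [Function.comp, Bool.and_eq_true, decide_eq_true_eq] at h2 ⊢
  rw [if_neg h2.1]

-- consequences of the sorted list starting with (m, i)
theorem pvLex_antisymm (a b : Int × Int) (hab : pvLex a b) (hba : pvLex b a) : a = b := by
  unfold pvLex at hab hba
  have : a.1 = b.1 ∧ a.2 = b.2 := by
    rcases hab with h | ⟨h1, h2⟩ <;> rcases hba with g | ⟨g1, g2⟩ <;> constructor <;> omega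
  exact Prod.ext this.1 this.2

theorem pvPosPairs_len_le (ls : List Int) : (pvPosPairs ls).length ≤ ls.length := by
  unfold pvPosPairs
  calc (((PySem.List.enumerate ls 0).filter (fun p => decide (0 < p.2))).map (fun p => (p.2, p.1))).length
      = ((PySem.List.enumerate ls 0).filter (fun p => decide (0 < p.2))).length := by simp
    _ ≤ (PySem.List.enumerate ls 0).length := List.length_filter_le _ _
    _ = ls.length := PySem.List.length_enumerate ls 0

theorem pvFindMin_none_of_nil (ls : List Int) (mi : Int) (hnil : pvPosPairs ls = []) :
    pvFindMin ls mi = (none, mi) := by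
  rcases pvScan_inv ls mi ls.length le_rfl with ⟨hs, _⟩ | ⟨m, i, hs, hi0, hik, hval, hpos, _, _⟩
  · exact hs
  · exfalso
    have hmm : ((ls.getD i.toNat 0, (i.toNat : Int)) : Int × Int) ∈ pvPosPairs ls := by
      rw [pvMem_posPairs, Int.toNat_natCast]
      exact ⟨by positivity, hik, rfl, by rw [hval]; exact hpos⟩
    rw [hnil] at hmm
    exact absurd hmm (List.not_mem_nil)

theorem pvHead_spec (ls : List Int) (m i : Int) (t : List (Int × Int))
    (hS : PySem.List.sorted (pvPosPairs ls) (fun p => p.1) false = (m, i) :: t) :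
    (m, i) ∈ pvPosPairs ls ∧ 0 ≤ i ∧ i.toNat < ls.length ∧ ls.getD i.toNat 0 = m ∧ 0 < m := by
  have hmem : (m, i) ∈ pvPosPairs ls := by
    have := (PySem.List.sorted_perm (pvPosPairs ls) (fun p => p.1) false).mem_iff (a := (m, i))
    rw [hS] at this
    exact this.mp List.mem_cons_self
  have h := (pvMem_posPairs ls m i).mp hmem
  exact ⟨hmem, h.1, h.2.1, h.2.2.1, h.2.2.2⟩

theorem pvFindMin_head (ls : List Int) (m i mi : Int) (t : List (Int × Int))
    (hS : PySem.List.sorted (pvPosPairs ls) (fun p => p.1) false = (m, i) :: t) :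
    pvFindMin ls mi = (some m, i) := by
  obtain ⟨hmem, hi0, hik, hval, hm⟩ := pvHead_spec ls m i t hS
  rcases pvScan_inv ls mi ls.length le_rfl with ⟨hs, hneg⟩ | ⟨m', i', hs, hi0', hik', hval', hpos', hmin', hfirst'⟩
  · exfalso
    have hc := hneg i.toNat hik
    rw [hval] at hc
    exact hc hm
  · have hmem' : (m', i') ∈ pvPosPairs ls := by
      rw [pvMem_posPairs]
      exact ⟨hi0', hik', hval', hpos'⟩
    have heq : (m', i') = (m, i) := by
      by_contra hne
      have hmemS : (m', i') ∈ (m, i) :: t := by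
        have := (PySem.List.sorted_perm (pvPosPairs ls) (fun p => p.1) false).mem_iff (a := (m', i'))
        rw [hS] at this
        exact this.mpr hmem'
      have hint : (m', i') ∈ t := by
        rcases List.mem_cons.mp hmemS with h | h
        · exact absurd h hne
        · exact h
      have hlex : pvLex (m, i) (m', i') := by
        have hpw := pvSorted_lex ls
        rw [hS] at hpw
        exact List.rel_of_pairwise_cons hpw hint
      rcases hlex with h | ⟨h1, h2⟩
      · have := hmin' i.toNat hik (by rw [hval]; exact hm)
        simp only at h
        omega
      · have := hfirst' i.toNat (by simp only at h1 h2; omega) (by rw [hval]; exact hm)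
        rw [hval] at this
        simp only at h1
        omega
    unfold pvFindMin
    rw [hs]
    injection heq with e1 e2
    rw [e1, e2]

theorem pvSorted_tail (ls : List Int) (m i : Int) (t : List (Int × Int))
    (hS : PySem.List.sorted (pvPosPairs ls) (fun p => p.1) false = (m, i) :: t) :
    PySem.List.sorted (pvPosPairs (PySem.List.pySetD ls i (-1))) (fun p => p.1) false = t := by
  obtain ⟨hmem, hi0, hik, hval, hm⟩ := pvHead_spec ls m i t hS
  have hpermS := PySem.List.sorted_perm (pvPosPairs ls) (fun p => p.1) false
  rw [hS] at hpermS
  have hnods : (((m, i) :: t).map (fun p => p.2)).Nodup := by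
    have h1 : ((pvPosPairs ls).map (fun p => p.2)).Pairwise (· < ·) :=
      (pvPosPairs_snd_lt ls).map _ (fun _ _ h => h)
    have h2 : ((pvPosPairs ls).map (fun p => p.2)).Nodup :=
      h1.imp (fun h => ne_of_lt h)
    exact ((hpermS.map (fun p => p.2)).nodup_iff).mpr h2
  have hti : ∀ p ∈ t, p.2 ≠ i := by
    intro p hp hpe
    have hni : i ∉ t.map (fun p => p.2) := by
      simp only [List.map_cons] at hnods
      exact (List.nodup_cons.mp hnods).1
    exact hni (hpe ▸ List.mem_map_of_mem hp)
  have hfilt : t.filter (fun p => decide (p.2 ≠ i)) = t :=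
    List.filter_eq_self.mpr (fun p hp => by simpa using hti p hp)
  have hperm2 : (pvPosPairs (PySem.List.pySetD ls i (-1))).Perm t := by
    rw [pvPosPairs_set ls i hi0]
    have e1 : ((pvPosPairs ls).filter (fun p => decide (p.2 ≠ i))).Perm
        (((m, i) :: t).filter (fun p => decide (p.2 ≠ i))) := (hpermS.filter _).symm
    have e2 : ((m, i) :: t).filter (fun p => decide (p.2 ≠ i)) = t := by
      rw [List.filter_cons_of_neg (by simp)]
      exact hfilt
    rw [e2] at e1
    exact e1
  refine List.Perm.eq_of_pairwise (le := pvLex) (fun a b _ _ => pvLex_antisymm a b) ?_ ?_ ?_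
  · exact pvSorted_lex _
  · have hpw := pvSorted_lex ls
    rw [hS] at hpw
    exact hpw.of_cons
  · exact (PySem.List.sorted_perm _ _ _).trans hperm2

theorem pvLen_tail (ls : List Int) (m i : Int) (t : List (Int × Int))
    (hS : PySem.List.sorted (pvPosPairs ls) (fun p => p.1) false = (m, i) :: t) :
    (pvPosPairs (PySem.List.pySetD ls i (-1))).length = t.length ∧
    (pvPosPairs ls).length = t.length + 1 := by
  constructor
  · rw [← PySem.List.length_sorted (pvPosPairs (PySem.List.pySetD ls i (-1))) (fun p => p.1) false,
      pvSorted_tail ls m i t hS]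
  · rw [← PySem.List.length_sorted (pvPosPairs ls) (fun p => p.1) false, hS]
    simp

theorem pvMain (L : Int) : ∀ (N : Nat) (ls : List Int) (cur count mi : Int) (res : List Int),
    (pvPosPairs ls).length ≤ N →
    count + ((pvPosPairs ls).length : Int) ≤ (ls.length : Int) →
    pvALoop ls L cur count mi res =
      pvBScan L (PySem.List.sorted (pvPosPairs ls) (fun p => p.1) false) cur res := by
  intro N
  induction N with
  | zero =>
    intro ls cur count mi res hN hcnt
    have hnil : pvPosPairs ls = [] := List.length_eq_zero_iff.mp (Nat.le_zero.mp hN)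
    have hsnil : PySem.List.sorted (pvPosPairs ls) (fun p => p.1) false = [] := by
      rw [hnil]; rfl
    rw [hsnil, pvALoop, pvFindMin_none_of_nil ls mi hnil]
    simp [pvBScan]
  | succ N ih =>
    intro ls cur count mi res hN hcnt
    cases hS : PySem.List.sorted (pvPosPairs ls) (fun p => p.1) false with
    | nil =>
      have hnil : pvPosPairs ls = [] := (PySem.List.sorted_eq_nil_iff _ _ _).mp hS
      rw [pvALoop, pvFindMin_none_of_nil ls mi hnil]
      simp [pvBScan]
    | cons hd t =>
      obtain ⟨m, i⟩ := hd
      obtain ⟨hmem, hi0, hik, hval, hm⟩ := pvHead_spec ls m i t hS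
      have hfind := pvFindMin_head ls m i mi t hS
      obtain ⟨hlen1, hlen2⟩ := pvLen_tail ls m i t hS
      rw [pvALoop]
      by_cases hcur : cur < L
      · rw [if_pos hcur]
        split
        next i' heq =>
          rw [hfind] at heq
          exact absurd (congrArg Prod.fst heq) (by simp)
        next m' i' heq =>
          rw [hfind] at heq
          injection heq with h1 h2
          injection h1 with h1
          subst h1
          subst h2
          by_cases hbig : cur + m > L
          · rw [if_pos (Or.inl hbig)]
            simp [pvBScan, hbig]
          · have hne : ¬ (cur + m > L ∨ count = (ls.length : Int)) := by
              push_neg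
              exact ⟨by omega, by omega⟩
            rw [if_neg hne]
            rw [ih (PySem.List.pySetD ls i (-1)) (cur + m) (count + 1) i (res ++ [i + 1])
              (by omega) (by rw [PySem.List.length_pySetD]; omega)]
            rw [pvSorted_tail ls m i t hS]
            simp only [pvBScan]
            rw [if_neg hbig]
      · rw [if_neg hcur]
        have hgt : cur + m > L := by omega
        simp [pvBScan, hgt]

-- ===== VERDICT (by name: the statement is the Claim_ definition above) =====
-- B on a one-element list [x]
theorem pvAlt_singleton (x L : Int) :
    save_programs_alt [x] L
      = if 0 < x then (if x ≤ L then [1] else []) else [] := by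
  have henum : pvPosPairs [x] = if 0 < x then [(x, 0)] else [] := by
    unfold pvPosPairs
    by_cases hx : 0 < x
    · simp [PySem.List.enumerate_cons, PySem.List.enumerate_nil, hx]
    · simp [PySem.List.enumerate_cons, PySem.List.enumerate_nil, hx]
  unfold save_programs_alt
  rw [henum]
  by_cases hx : 0 < x
  · simp only [if_pos hx]
    have hs : PySem.List.sorted [((x : Int), (0 : Int))] (fun p => p.1) false = [(x, 0)] :=
      PySem.List.sorted_eq_self_of_pairwise _ _ (List.pairwise_singleton _ _)
    rw [hs]
    by_cases hxl : x ≤ L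
    · simp only [if_pos hxl, pvBScan]
      rw [if_neg (by omega)]
      norm_num [pvBScan]
    · simp only [if_neg hxl, pvBScan]
      rw [if_pos (by omega)]
  · simp only [if_neg hx]
    rfl

theorem save_programs_spec : Claim_unchanged_save_programs := by
  unfold Claim_unchanged_save_programs Spec_save_programs
  intro ls L _ hD
  unfold save_programs
  by_cases h1 : ls.length = 1
  · rw [if_pos h1]
    obtain ⟨x, rfl⟩ := List.length_eq_one_iff.mp h1
    unfold D_save_programs at hD
    rw [not_and_or] at hD
    rcases hD with h | h
    · exact absurd h1 h
    · rw [not_not] at h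
      rw [pvAlt_singleton]
      simp only [List.getD_cons_zero] at h
      rw [if_pos h.1, if_pos h.2]
  · rw [if_neg h1]
    rw [pvMain L (pvPosPairs ls).length ls 0 0 0 [] le_rfl
      (by have := pvPosPairs_len_le ls; omega)]
    rfl

theorem save_programs_changed : Claim_changed_save_programs := by
  unfold Claim_changed_save_programs; decide

theorem save_programs_tight : Claim_exact_save_programs := by
  unfold Claim_exact_save_programs D_save_programs
  intro ls L _ hD
  obtain ⟨h1, h2⟩ := hD
  obtain ⟨x, rfl⟩ := List.length_eq_one_iff.mp h1
  unfold save_programs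
  rw [if_pos h1, pvAlt_singleton]
  simp only [List.getD_cons_zero] at h2
  rw [not_and_or] at h2
  by_cases hx : 0 < x
  · rw [if_pos hx]
    rcases h2 with h | h
    · exact absurd hx h
    · rw [if_neg h]
      simp
  · rw [if_neg hx]
    simp
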